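-- pv_equiv track=rewrite | github.com/srp33/BioPreserve | basis_workflow/verification/A01_validation_suite.py | find_er_axis
-- ===== SOURCE A (Python) =====
-- def find_er_axis(gene_sets):
--     """Find the axis containing ESR1, or fall back to first axis with 'ER' in name."""
--     for name, genes in gene_sets.items():
--         if 'ESR1' in genes:
--             return name
--     for name in gene_sets:
--         if 'ER' in name.upper():
--             return name
--     # Fallback: first axis
--     return list(gene_sets.keys())[0] if gene_sets else None
-- ===== SOURCE B (Python) =====
-- def find_er_axis(gene_sets):
--     """Find the axis containing ESR1, or fall back to first axis with 'ER' in name."""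
--     er_candidate = None
--     first_key = None
--     for name, genes in gene_sets.items():
--         if 'ESR1' in genes:
--             return name
--         if er_candidate is None and 'ER' in name.upper():
--             er_candidate = name
--         if first_key is None:
--             first_key = name
--     return er_candidate if er_candidate is not None else first_key
-- ===== Notes on version B (the rewrite author's own statement) =====
-- stated objective: simpler
-- what changed: Replaces A's two full scans plus a keys()-list fallback with one pass that threads the first ER-name and the first key as accumulators while keeping ESR1 priority.
import Mathlib
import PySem

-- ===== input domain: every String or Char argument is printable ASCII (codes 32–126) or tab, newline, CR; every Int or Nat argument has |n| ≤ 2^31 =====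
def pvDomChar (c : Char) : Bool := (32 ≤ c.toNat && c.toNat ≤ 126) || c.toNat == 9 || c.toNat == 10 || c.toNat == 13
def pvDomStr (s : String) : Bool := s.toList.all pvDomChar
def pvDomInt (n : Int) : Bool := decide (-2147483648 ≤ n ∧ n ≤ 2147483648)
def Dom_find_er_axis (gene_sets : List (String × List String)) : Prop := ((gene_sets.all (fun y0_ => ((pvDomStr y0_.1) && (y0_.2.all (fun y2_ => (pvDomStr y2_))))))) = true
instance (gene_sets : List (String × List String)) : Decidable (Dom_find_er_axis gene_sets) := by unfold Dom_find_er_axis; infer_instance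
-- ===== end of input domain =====

-- B replaces A's two full scans plus a keys()[0] fallback with a single pass threading
-- the first ER-name and the first key as accumulators (simpler decomposition; same cost).

-- ===== PORT A =====
-- first loop: 'for name, genes in gene_sets.items(): if "ESR1" in genes: return name'
def pvLoop1 : List (String × List String) → Option String
  | [] => none
  | (name, genes) :: rest =>
      if genes.contains "ESR1" then some name else pvLoop1 rest

-- second loop: 'for name in gene_sets: if "ER" in name.upper(): return name'
def pvLoop2 : List (String × List String) → Option String
  | [] => none
  | (name, _) :: rest =>
      if PySem.Str.isIn "ER" (PySem.Str.upper name) then some name else pvLoop2 rest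

def find_er_axis (gene_sets : List (String × List String)) : Option String :=
  match pvLoop1 gene_sets with
  | some name => some name
  | none =>
    match pvLoop2 gene_sets with
    | some name => some name
    | none =>
      -- 'list(gene_sets.keys())[0] if gene_sets else None'
      match gene_sets with
      | [] => none
      | (name, _) :: _ => some name

-- ===== PORT B =====
-- single pass with er_candidate / first_key accumulators
def pvAltLoop : List (String × List String) → Option String → Option String → Option String
  | [], erCand, firstKey =>
      match erCand with
      | some n => some n
      | none => firstKey
  | (name, genes) :: rest, erCand, firstKey =>
      if genes.contains "ESR1" then some name
      else
        pvAltLoop rest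
          (if erCand.isNone && PySem.Str.isIn "ER" (PySem.Str.upper name) then some name else erCand)
          (if firstKey.isNone then some name else firstKey)

def find_er_axis_alt (gene_sets : List (String × List String)) : Option String :=
  pvAltLoop gene_sets none none

-- ===== PRECONDITION & SPEC =====
def Spec_find_er_axis (gene_sets : List (String × List String)) (out : Option String) : Prop := out = find_er_axis_alt gene_sets
instance (gene_sets : List (String × List String)) (out : Option String) : Decidable (Spec_find_er_axis gene_sets out) := by unfold Spec_find_er_axis; infer_instance

-- ===== CLAIM (what is proved, stated in full; the proofs are below) =====
def Claim_equal_find_er_axis : Prop := ∀ (gene_sets : List (String × List String)), Dom_find_er_axis gene_sets → Spec_find_er_axis gene_sets (find_er_axis gene_sets)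

-- ===== LEMMAS AND PROOFS =====

-- first key of the list, as an option (A's final fallback)
def pvFirstKey : List (String × List String) → Option String
  | [] => none
  | (name, _) :: _ => some name

-- loop invariant: the single pass equals loop1, then the threaded er-candidate / loop2, then
-- the threaded first-key / head fallback
theorem pvAltLoop_eq (gs : List (String × List String)) :
    ∀ erCand firstKey : Option String,
      pvAltLoop gs erCand firstKey =
        match pvLoop1 gs with
        | some n => some n
        | none => (erCand.or (pvLoop2 gs)).or (firstKey.or (pvFirstKey gs)) := by
  induction gs with
  | nil =>
      intro erCand firstKey
      cases erCand <;> cases firstKey <;> simp [pvAltLoop, pvLoop1, pvLoop2, pvFirstKey]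
  | cons hd tl ih =>
      intro erCand firstKey
      obtain ⟨name, genes⟩ := hd
      by_cases h1 : "ESR1" ∈ genes
      · simp [pvAltLoop, pvLoop1, h1]
      · rw [show pvAltLoop ((name, genes) :: tl) erCand firstKey =
            pvAltLoop tl
              (if erCand.isNone && PySem.Str.isIn "ER" (PySem.Str.upper name) then some name else erCand)
              (if firstKey.isNone then some name else firstKey) by simp [pvAltLoop, h1]]
        
        rw [ih]
        cases erCand <;> cases firstKey <;>
          by_cases h2 : PySem.Chars.isIn ['E', 'R'] (PySem.Chars.upper name.toList) = true <;>
          simp [pvLoop1, pvLoop2, pvFirstKey, h1, h2, Option.or]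

-- ===== VERDICT (by name: the statement is the Claim_ definition above) =====
theorem find_er_axis_spec : Claim_equal_find_er_axis := by
  intro gs _
  unfold Spec_find_er_axis find_er_axis find_er_axis_alt
  rw [pvAltLoop_eq]
  cases h1 : pvLoop1 gs <;> cases h2 : pvLoop2 gs <;>
    cases gs <;> simp_all [Option.or, pvFirstKey]
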